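-- pv_equiv track=rewrite | github.com/k19110-yamaguchi/EstimateAirPressureDecrease | app/src/main/python/extractIntervals.py | extractIntervalsByCorner
-- ===== SOURCE A (Python) =====
-- def extractIntervalsByCorner(startTime, stopTime, cornerTime):
--     resStartTime = []
--     resStopTime = []
--
--     for i in range(len(startTime)):
--         resStartTime.append(startTime[i])
--         for j in range(len(cornerTime)):
--                 if startTime[i] <= cornerTime[j] and cornerTime[j] <= stopTime[i]:
--                     resStopTime.append(cornerTime[j])
--                     resStartTime.append(cornerTime[j])
--
--         resStopTime.append(stopTime[i])
--     return [resStartTime, resStopTime]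
-- ===== SOURCE B (Python) =====
-- def extractIntervalsByCorner(startTime, stopTime, cornerTime):
--     mids = [[] for _ in startTime]
--     for c in cornerTime:
--         mids = [m + [c] if s <= c <= t else m
--                 for m, (s, t) in zip(mids, zip(startTime, stopTime))]
--     resStartTime = []
--     resStopTime = []
--     for (s, t), m in zip(zip(startTime, stopTime), mids):
--         resStartTime += [s] + m
--         resStopTime += m + [t]
--     return [resStartTime, resStopTime]
-- ===== Notes on version B (the rewrite author's own statement) =====
-- stated objective: alternative
-- what changed: Loop interchange: A scans all corners inside each interval iteration building both result lists at once; B iterates corners in the outer loop, maintaining a per-interval list of matched corners via zip, then assembles the two result lists in a separate pass.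
import Mathlib
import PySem

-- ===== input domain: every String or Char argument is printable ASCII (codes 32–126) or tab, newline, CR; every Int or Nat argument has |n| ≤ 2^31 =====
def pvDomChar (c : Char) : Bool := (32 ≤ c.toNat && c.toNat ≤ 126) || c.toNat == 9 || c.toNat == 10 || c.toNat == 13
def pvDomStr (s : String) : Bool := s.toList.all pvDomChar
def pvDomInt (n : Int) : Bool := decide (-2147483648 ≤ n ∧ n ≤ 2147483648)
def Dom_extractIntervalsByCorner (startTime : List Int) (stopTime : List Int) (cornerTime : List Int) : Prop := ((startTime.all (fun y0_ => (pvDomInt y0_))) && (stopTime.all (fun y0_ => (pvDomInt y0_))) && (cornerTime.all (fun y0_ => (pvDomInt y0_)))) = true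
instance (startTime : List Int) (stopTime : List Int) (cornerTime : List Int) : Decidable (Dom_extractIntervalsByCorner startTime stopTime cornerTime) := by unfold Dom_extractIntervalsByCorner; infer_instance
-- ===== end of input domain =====

-- B interchanges the loops: corners are scanned in the OUTER loop, per-interval matched-corner lists are
-- maintained via zip, and the two result lists are assembled in a separate pass (objective: alternative).
-- ===== PORT A =====
def extractIntervalsByCorner (startTime : List Int) (stopTime : List Int) (cornerTime : List Int) : List (List Int) :=
  let res := (PySem.List.pyRange 0 (PySem.List.len startTime) 1).foldl
    (fun (acc : List Int × List Int) i =>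
      let acc1 := (acc.1 ++ [PySem.List.pyGetD startTime i 0], acc.2)
      let acc2 := (PySem.List.pyRange 0 (PySem.List.len cornerTime) 1).foldl
        (fun (acc : List Int × List Int) j =>
          if PySem.List.pyGetD startTime i 0 ≤ PySem.List.pyGetD cornerTime j 0 ∧
             PySem.List.pyGetD cornerTime j 0 ≤ PySem.List.pyGetD stopTime i 0 then
            (acc.1 ++ [PySem.List.pyGetD cornerTime j 0], acc.2 ++ [PySem.List.pyGetD cornerTime j 0])
          else acc) acc1
      (acc2.1, acc2.2 ++ [PySem.List.pyGetD stopTime i 0])) ([], [])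
  [res.1, res.2]

-- ===== PORT B =====
def extractIntervalsByCorner_alt (startTime : List Int) (stopTime : List Int) (cornerTime : List Int) : List (List Int) :=
  let mids0 : List (List Int) := startTime.map (fun _ => ([] : List Int))
  let mids := cornerTime.foldl
    (fun (mids : List (List Int)) c =>
      (mids.zip (startTime.zip stopTime)).map
        (fun p => if p.2.1 ≤ c ∧ c ≤ p.2.2 then p.1 ++ [c] else p.1))
    mids0
  let res := ((startTime.zip stopTime).zip mids).foldl
    (fun (acc : List Int × List Int) p =>
      (acc.1 ++ [p.1.1] ++ p.2, acc.2 ++ p.2 ++ [p.1.2])) ([], [])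
  [res.1, res.2]

-- ===== PRECONDITION & SPEC =====
-- A indexes stopTime[i] for every i below len(startTime), so it raises IndexError exactly when
-- stopTime is shorter than startTime; those inputs are excluded.
def Pre_extractIntervalsByCorner (startTime : List Int) (stopTime : List Int) (cornerTime : List Int) : Prop :=
  startTime.length ≤ stopTime.length
instance (startTime : List Int) (stopTime : List Int) (cornerTime : List Int) : Decidable (Pre_extractIntervalsByCorner startTime stopTime cornerTime) := by unfold Pre_extractIntervalsByCorner; infer_instance

def pvWitness_extractIntervalsByCorner : List Int × List Int × List Int := ([1, 5], [3, 9], [2, 4, 6])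

def Spec_extractIntervalsByCorner (startTime : List Int) (stopTime : List Int) (cornerTime : List Int) (out : List (List Int)) : Prop := out = extractIntervalsByCorner_alt startTime stopTime cornerTime
instance (startTime : List Int) (stopTime : List Int) (cornerTime : List Int) (out : List (List Int)) : Decidable (Spec_extractIntervalsByCorner startTime stopTime cornerTime out) := by unfold Spec_extractIntervalsByCorner; infer_instance

-- ===== CLAIM (what is proved, stated in full; the proofs are below) =====
def Claim_equal_extractIntervalsByCorner : Prop := ∀ (startTime : List Int) (stopTime : List Int) (cornerTime : List Int), Dom_extractIntervalsByCorner startTime stopTime cornerTime → Pre_extractIntervalsByCorner startTime stopTime cornerTime → Spec_extractIntervalsByCorner startTime stopTime cornerTime (extractIntervalsByCorner startTime stopTime cornerTime)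

-- ===== LEMMAS AND PROOFS =====

lemma zipMapLeft {a b : Type} (g : a → b) (L : List a) :
    (L.map g).zip L = L.map (fun q => (g q, q)) := by
  induction L with
  | nil => rfl
  | cons x l ih => simp [ih]

lemma zipMapRight {a b : Type} (g : a → b) (L : List a) :
    L.zip (L.map g) = L.map (fun q => (q, g q)) := by
  induction L with
  | nil => rfl
  | cons x l ih => simp [ih]

-- A's inner corner loop on the pair accumulator appends the filtered corners to both components.
lemma pairFold (cs : List Int) (s t : Int) (u v : List Int) :
    cs.foldl (fun (acc : List Int × List Int) c =>
        if s ≤ c ∧ c ≤ t then (acc.1 ++ [c], acc.2 ++ [c]) else acc) (u, v)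
    = (u ++ cs.filter (fun c => decide (s ≤ c ∧ c ≤ t)),
       v ++ cs.filter (fun c => decide (s ≤ c ∧ c ≤ t))) := by
  induction cs generalizing u v with
  | nil => simp
  | cons c cs ih =>
    by_cases h : s ≤ c ∧ c ≤ t <;> simp [h, ih]

-- A's indexed corner loop, in the closed form used by the main proof.
lemma innerEq (ct : List Int) (s t : Int) (u v : List Int) :
    (PySem.List.pyRange 0 (PySem.List.len ct) 1).foldl
      (fun (acc : List Int × List Int) j =>
        if s ≤ PySem.List.pyGetD ct j 0 ∧ PySem.List.pyGetD ct j 0 ≤ t then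
          (acc.1 ++ [PySem.List.pyGetD ct j 0], acc.2 ++ [PySem.List.pyGetD ct j 0])
        else acc) (u, v)
    = (u ++ ct.filter (fun c => decide (s ≤ c ∧ c ≤ t)),
       v ++ ct.filter (fun c => decide (s ≤ c ∧ c ≤ t))) := by
  rw [PySem.List.foldl_pyRange_zero_pyGetD ct 0
    (fun (acc : List Int × List Int) c =>
      if s ≤ c ∧ c ≤ t then (acc.1 ++ [c], acc.2 ++ [c]) else acc) (u, v)]
  exact pairFold ct s t u v

-- A's index loop over startTime/stopTime is the fold over their zip.
lemma rangeZipFold {b : Type} (f : b → Int → Int → b) :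
    ∀ (start stop : List Int) (init : b), start.length ≤ stop.length →
    (List.range start.length).foldl
        (fun acc k => f acc (start.getD k 0) (stop.getD k 0)) init
      = (start.zip stop).foldl (fun acc q => f acc q.1 q.2) init := by
  intro start
  induction start with
  | nil => intro stop init _; simp
  | cons x xs ih =>
    intro stop init h
    cases stop with
    | nil => simp at h
    | cons y ys =>
      simp only [List.length_cons, List.range_succ_eq_map, List.foldl_cons, List.foldl_map,
        List.getD_cons_zero, List.getD_cons_succ, List.zip_cons_cons]
      exact ih ys (f init x y) (by simpa using h)

-- B's corner loop maintains, for each zipped interval q, g q plus the corners of the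
-- processed prefix that fall inside q.
lemma midsFold (L : List (Int × Int)) :
    ∀ (cs : List Int) (g : (Int × Int) → List Int),
    cs.foldl (fun (mids : List (List Int)) c =>
        (mids.zip L).map (fun p => if p.2.1 ≤ c ∧ c ≤ p.2.2 then p.1 ++ [c] else p.1))
      (L.map g)
    = L.map (fun q => g q ++ cs.filter (fun c => decide (q.1 ≤ c ∧ c ≤ q.2))) := by
  intro cs
  induction cs with
  | nil => intro g; simp
  | cons c cs ih =>
    intro g
    simp only [List.foldl_cons, zipMapLeft, List.map_map]
    have hstep : ((fun p : (List Int) × (Int × Int) =>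
          if p.2.1 ≤ c ∧ c ≤ p.2.2 then p.1 ++ [c] else p.1) ∘ fun q => (g q, q))
        = fun q => g q ++ (if q.1 ≤ c ∧ c ≤ q.2 then [c] else []) := by
      funext q
      by_cases h : q.1 ≤ c ∧ c ≤ q.2 <;> simp [h]
    rw [hstep, ih (fun q => g q ++ (if q.1 ≤ c ∧ c ≤ q.2 then [c] else []))]
    refine List.map_congr_left ?_
    intro q _
    by_cases h : q.1 ≤ c ∧ c ≤ q.2 <;> simp [h]

-- ===== VERDICT (by name: the statement is the Claim_ definition above) =====
theorem extractIntervalsByCorner_spec : Claim_equal_extractIntervalsByCorner := by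
  intro startTime stopTime cornerTime _ hpre
  unfold Pre_extractIntervalsByCorner at hpre
  unfold Spec_extractIntervalsByCorner extractIntervalsByCorner extractIntervalsByCorner_alt
  -- A side: close the inner loop, then turn the index loop into a fold over the zip
  simp only [innerEq]
  rw [PySem.List.pyRange_one]
  simp only [sub_zero, PySem.List.len_eq, Int.toNat_natCast, List.foldl_map, zero_add,
    PySem.List.pyGetD_natCast]
  rw [rangeZipFold (fun (acc : List Int × List Int) s t =>
        (acc.1 ++ [s] ++ cornerTime.filter (fun c => decide (s ≤ c ∧ c ≤ t)),
         acc.2 ++ cornerTime.filter (fun c => decide (s ≤ c ∧ c ≤ t)) ++ [t]))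
      startTime stopTime ([], []) hpre]
  -- B side: initial mids as a map over the zip, then the two structural lemmas
  have h0 : startTime.map (fun _ => ([] : List Int))
      = (startTime.zip stopTime).map (fun _ => ([] : List Int)) := by
    apply List.ext_getElem
    · simp only [List.length_map, List.length_zip]
      omega
    · intro i h1 h2
      simp
  rw [h0, midsFold (startTime.zip stopTime) cornerTime (fun _ => ([] : List Int))]
  simp only [List.nil_append, zipMapRight, List.foldl_map]
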